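-- pv_equiv track=rewrite | github.com/dhelfrich/AdventOfCode2023 | 2023/Day09/day9.py | extendDiffListsBack
-- ===== SOURCE A (Python) =====
-- import math
--
-- def creatDiffLists(list):
--     output = [[] for i in range(len(list))]
--     output[0] = list
--
--     for i in range(0, len(output) - 1):
--         diffs = []
--         for j in range(0, len(output[i]) - 1):
--             diffs.append( output[i][j+1] - output[i][j])
--         output[i+1] = diffs
--     return output
--
-- def extendDiffListsBack(sequence):
--     diffArray = creatDiffLists(sequence)
--     length = -1
--     for i, l in enumerate(diffArray):
--         if math.prod([x == 0 for x in l]):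
--             length = i
--             break
--     diffArray[length].insert(0, 0)
--     for i in range(1, length + 1):
--         diffArray[length - i].insert(0,
--             diffArray[length - i][0] -
--             diffArray[length - i + 1][0]
--
--         )
--     return diffArray
-- ===== SOURCE B (Python) =====
-- def _build(lst):
--     # difference triangle: the sequence, then its pairwise differences, recursively
--     if len(lst) <= 1:
--         return [lst] if lst else []
--     return [lst] + _build([b - a for a, b in zip(lst, lst[1:])])
--
--
-- def extendDiffListsBack(sequence):
--     levels = _build(sequence)
--     # first all-zero level; default -1, i.e. the bottom level
--     k = next((i for i, l in enumerate(levels) if all(x == 0 for x in l)), -1)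
--     levels[k] = [0] + levels[k]
--     for i in reversed(range(k)):
--         levels[i] = [levels[i][0] - levels[i + 1][0]] + levels[i]
--     return levels
-- ===== Notes on version B (the rewrite author's own statement) =====
-- stated objective: alternative
-- what changed: Replaces the nested index-loop array-update triangle builder with structural recursion on successive difference lists, and replaces the enumerate/math.prod scan and in-place insert loop with next() over a generator (defaulting to the bottom level) and a functional rebuild that conses the new leading value while walking the indices downward; Pre_ excludes only the empty list, on which A raises IndexError.
import Mathlib
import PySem

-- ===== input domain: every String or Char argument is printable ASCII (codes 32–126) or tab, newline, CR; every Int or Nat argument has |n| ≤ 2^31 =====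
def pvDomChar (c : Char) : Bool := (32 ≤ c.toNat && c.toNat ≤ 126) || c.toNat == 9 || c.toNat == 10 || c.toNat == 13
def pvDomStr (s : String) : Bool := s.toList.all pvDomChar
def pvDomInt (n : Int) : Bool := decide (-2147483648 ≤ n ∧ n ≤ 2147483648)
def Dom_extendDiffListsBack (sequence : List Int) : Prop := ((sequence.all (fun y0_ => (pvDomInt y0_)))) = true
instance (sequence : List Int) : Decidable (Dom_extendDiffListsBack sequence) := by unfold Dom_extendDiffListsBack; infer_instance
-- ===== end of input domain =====

-- B builds the difference triangle by structural recursion and extends it backwards by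
-- rebuilding each level with a new head (no mutation); equivalence is about the return
-- value only — A mutates its argument (level 0 of its triangle aliases the input list).

-- ===== PORT A =====
-- helper: creatDiffLists from the Python module
def aCreatDiffLists (list : List Int) : List (List Int) :=
  let output := (List.replicate list.length ([] : List Int)).set 0 list
  (List.range (output.length - 1)).foldl (fun output i =>
    let diffs := (List.range ((output.getD i []).length - 1)).foldl
      (fun diffs j => diffs ++ [(output.getD i []).getD (j+1) 0 - (output.getD i []).getD j 0]) []
    output.set (i+1) diffs) output

-- helper: the `for i, l in enumerate(...): if math.prod(...): length = i; break` scan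
-- (math.prod of the booleans `x == 0` is nonzero exactly when all factors are True)
def aFindLen : Nat → List (List Int) → Int
  | _, [] => -1
  | s, l :: ls =>
    if ((l.map (fun x => if x == 0 then (1 : Nat) else 0)).prod ≠ 0) then (s : Int)
    else aFindLen (s+1) ls

def extendDiffListsBack (sequence : List Int) : List (List Int) :=
  let diffArray := aCreatDiffLists sequence
  let length : Int := aFindLen 0 diffArray
  -- Python list indexing: a negative `length` counts from the end
  let idx : Int := if length < 0 then (diffArray.length : Int) + length else length
  let diffArray := diffArray.modify idx.toNat (fun l => 0 :: l)
  (PySem.List.pyRange 1 (length+1) 1).foldl (fun ar i =>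
    let t := (length - i).toNat
    ar.modify t (fun l => ((ar.getD t []).getD 0 0 - (ar.getD (t+1) []).getD 0 0) :: l)) diffArray

-- ===== PORT B =====
-- helper: recursive triangle builder (_build in Source B)
def bBuild (lst : List Int) : List (List Int) :=
  if _h : lst.length ≤ 1 then (if lst.isEmpty then [] else [lst])
  else lst :: bBuild (List.zipWith (fun a b => b - a) lst lst.tail)
termination_by lst.length
decreasing_by simp [List.length_zipWith]; omega

-- helper: next(generator, -1) — index of the first all-zero level, default -1
def bFirstZero (levels : List (List Int)) : Int :=
  match levels.findIdx? (fun l => l.all (fun x => x == 0)) with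
  | some i => (i : Int)
  | none => -1

def extendDiffListsBack_alt (sequence : List Int) : List (List Int) :=
  let levels := bBuild sequence
  let k : Int := bFirstZero levels
  -- levels[k] = [0] + levels[k]; a negative k counts from the end
  let kidx : Int := if k < 0 then (levels.length : Int) + k else k
  let levels := levels.set kidx.toNat ((0 : Int) :: levels.getD kidx.toNat [])
  -- for i in reversed(range(k)): levels[i] = [levels[i][0] - levels[i+1][0]] + levels[i]
  ((PySem.List.pyRange 0 k 1).reverse).foldl (fun lv i =>
    lv.set i.toNat (((lv.getD i.toNat []).getD 0 0 - (lv.getD (i.toNat + 1) []).getD 0 0)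
      :: lv.getD i.toNat [])) levels

-- ===== PRECONDITION & SPEC =====
-- Pre_ excludes only the empty list, on which A raises IndexError (output[0] = list on an empty output).
def Pre_extendDiffListsBack (sequence : List Int) : Prop := sequence ≠ []
instance (sequence : List Int) : Decidable (Pre_extendDiffListsBack sequence) := by
  unfold Pre_extendDiffListsBack; infer_instance

def pvWitness_extendDiffListsBack : List Int := [1, 2, 4]

def Spec_extendDiffListsBack (sequence : List Int) (out : List (List Int)) : Prop :=
  out = extendDiffListsBack_alt sequence
instance (sequence : List Int) (out : List (List Int)) : Decidable (Spec_extendDiffListsBack sequence out) := by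
  unfold Spec_extendDiffListsBack; infer_instance

-- ===== CLAIM (what is proved, stated in full; the proofs are below) =====
def Claim_equal_extendDiffListsBack : Prop := ∀ (sequence : List Int), Dom_extendDiffListsBack sequence → Pre_extendDiffListsBack sequence → Spec_extendDiffListsBack sequence (extendDiffListsBack sequence)

-- ===== LEMMAS AND PROOFS =====

-- difference of consecutive elements, and the ideal triangle
def dF (l : List Int) : List Int := List.zipWith (fun a b => b - a) l l.tail

def iterDF : Nat → List Int → List Int
  | 0, l => l
  | n+1, l => iterDF n (dF l)

def tri : Nat → List Int → List (List Int)
  | 0, _ => []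
  | n+1, l => l :: tri n (dF l)

theorem dF_length (l : List Int) : (dF l).length = l.length - 1 := by
  simp only [dF, List.length_zipWith, List.length_tail]
  omega

theorem tri_length (n : Nat) (l : List Int) : (tri n l).length = n := by
  induction n generalizing l with
  | zero => rfl
  | succ m ih => simp [tri, ih]

theorem tri_succ (n : Nat) (l : List Int) : tri (n+1) l = tri n l ++ [iterDF n l] := by
  induction n generalizing l with
  | zero => rfl
  | succ m ih =>
    rw [show tri (m+2) l = l :: tri (m+1) (dF l) from rfl, ih (dF l)]
    rfl

theorem tri_getD (n i : Nat) (l : List Int) (h : i < n) :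
    (tri n l).getD i [] = iterDF i l := by
  induction i generalizing n l with
  | zero =>
    cases n with
    | zero => omega
    | succ m => rfl
  | succ j ih =>
    cases n with
    | zero => omega
    | succ m =>
      simp only [tri, List.getD_cons_succ]
      exact ih m (dF l) (by omega)

-- the inner append loop of creatDiffLists computes dF
theorem foldl_append_map {α β : Type} (f : α → β) (xs : List α) (acc : List β) :
    xs.foldl (fun d j => d ++ [f j]) acc = acc ++ xs.map f := by
  induction xs generalizing acc with
  | nil => simp
  | cons x xs ih => simp [ih]

theorem innerLoop (prev : List Int) :
    (List.range (prev.length - 1)).foldl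
      (fun d j => d ++ [prev.getD (j+1) 0 - prev.getD j 0]) [] = dF prev := by
  rw [foldl_append_map]
  simp only [List.nil_append]
  apply List.ext_getElem
  · simp only [List.length_map, List.length_range, dF, List.length_zipWith, List.length_tail]
    omega
  · intro i h1 h2
    simp only [List.getElem_map, List.getElem_range]
    have hi : i < prev.length - 1 := by simpa using h1
    have h1 : prev.getD (i+1) 0 = prev[i+1]'(by omega) := List.getD_eq_getElem _ _ (by omega)
    have h2 : prev.getD i 0 = prev[i]'(by omega) := List.getD_eq_getElem _ _ (by omega)
    simp only [dF, List.getElem_zipWith, List.getElem_tail, h1, h2]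

theorem dF_iterDF (n : Nat) (l : List Int) : dF (iterDF n l) = iterDF n (dF l) := by
  induction n generalizing l with
  | zero => rfl
  | succ m ih => exact ih (dF l)

theorem creat_loop (l : List Int) (hn : 1 ≤ l.length) :
    ∀ m, m ≤ l.length - 1 →
      (List.range m).foldl (fun output i => output.set (i+1) (dF (output.getD i [])))
        (l :: List.replicate (l.length - 1) [])
      = tri (m+1) l ++ List.replicate (l.length - 1 - m) [] := by
  intro m
  induction m with
  | zero => intro _; simp [tri]
  | succ m ih =>
    intro hm
    rw [List.range_succ, List.foldl_append, ih (by omega)]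
    simp only [List.foldl_cons, List.foldl_nil]
    have hlen : (tri (m+1) l).length = m + 1 := tri_length _ _
    have hget : (tri (m+1) l ++ List.replicate (l.length - 1 - m) []).getD m [] = iterDF m l := by
      rw [List.getD_append _ _ _ _ (by omega)]
      exact tri_getD _ _ _ (by omega)
    rw [hget]
    have hrep : l.length - 1 - m = (l.length - 1 - (m+1)) + 1 := by omega
    rw [hrep, List.replicate_succ]
    rw [List.set_append_right _ _ (by omega)]
    have : m + 1 - (tri (m+1) l).length = 0 := by omega
    rw [this]
    simp only [List.set_cons_zero]
    rw [tri_succ (m+1) l, dF_iterDF]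
    simp [iterDF]

theorem creat_eq (l : List Int) : aCreatDiffLists l = tri l.length l := by
  cases l with
  | nil => rfl
  | cons a t =>
    simp only [aCreatDiffLists, innerLoop]
    have hinit : (List.replicate (a::t).length ([] : List Int)).set 0 (a::t)
        = (a::t) :: List.replicate ((a::t).length - 1) [] := by
      simp [List.replicate_succ]
    rw [hinit]
    have hlen : ((a::t) :: List.replicate ((a::t).length - 1) ([] : List Int)).length - 1
        = (a::t).length - 1 := by simp
    rw [hlen]
    have := creat_loop (a::t) (by simp) ((a::t).length - 1) (le_refl _)
    rw [this]
    simp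

theorem bBuild_eq (l : List Int) : bBuild l = tri l.length l := by
  induction hn : l.length using Nat.strong_induction_on generalizing l with
  | _ n ih =>
    subst hn
    rw [bBuild]
    by_cases h : l.length ≤ 1
    · cases l with
      | nil => simp [tri]
      | cons a t =>
        cases t with
        | nil => simp [tri]
        | cons b t' => simp at h
    · simp only [dif_neg h]
      have hd : (List.zipWith (fun a b => b - a) l l.tail) = dF l := rfl
      have hdl : (dF l).length = l.length - 1 := dF_length l
      rw [hd, ih (l.length - 1) (by omega) (dF l) hdl]
      have h1 : l.length = (l.length - 1) + 1 := by omega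
      conv_rhs => rw [h1]
      rfl

-- the enumerate/break scan agrees with findIdx? (via the bool-product condition)
theorem prod_ne_zero_iff (l : List Int) :
    ((l.map (fun x => if x == 0 then (1 : Nat) else 0)).prod ≠ 0) ↔
      l.all (fun x => x == 0) = true := by
  induction l with
  | nil => simp
  | cons a t _ =>
    by_cases h : a = 0 <;> simp [h]

theorem findLen_eq (arr : List (List Int)) : ∀ s : Nat,
    aFindLen s arr = (match arr.findIdx? (fun l => l.all (fun x => x == 0)) with
      | some k => ((s + k : Nat) : Int)
      | none => -1) := by
  induction arr with
  | nil => intro s; rfl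
  | cons l ls ih =>
    intro s
    rw [List.findIdx?_cons]
    by_cases h : l.all (fun x => x == 0) = true
    · rw [aFindLen, if_pos ((prod_ne_zero_iff l).mpr h), h]
      simp
    · have hb : (l.all (fun x => x == 0)) = false := by simpa using h
      rw [aFindLen, if_neg (by rw [prod_ne_zero_iff]; exact h), ih (s+1), hb]
      cases hfi : ls.findIdx? (fun l => l.all (fun x => x == 0)) with
      | none => simp
      | some k =>
        simp only [Option.map_some]
        push_cast
        ring

-- modify-with-cons is set-with-cons-of-getD (true also out of range: both are the identity)
theorem modify_eq_set_cons (c : Int) : ∀ (n : Nat) (l : List (List Int)),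
    l.modify n (fun x => c :: x) = l.set n (c :: l.getD n []) := by
  intro n l
  induction l generalizing n with
  | nil => simp
  | cons a t ih =>
    cases n with
    | zero => simp
    | succ m => simp [List.modify_succ_cons, ih m]

-- reversing range m is mapping j ↦ m-1-j over it
theorem rev_range (m : Nat) : (List.range m).reverse = (List.range m).map (fun j => m - 1 - j) := by
  induction m with
  | zero => rfl
  | succ n ih =>
    conv_lhs => rw [List.range_succ]
    rw [List.reverse_append, List.reverse_singleton, ih]
    conv_rhs => rw [List.range_succ_eq_map]
    simp only [List.map_cons, List.map_map, List.singleton_append]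
    refine List.cons_eq_cons.mpr ⟨by omega, ?_⟩
    apply List.map_congr_left
    intro j _
    simp only [Function.comp_apply]
    omega

-- the two extension loops walk the same indices k-1, …, 0 with the same rebuild step
theorem loops_eq (k : Nat) (arr : List (List Int)) :
    (PySem.List.pyRange 1 ((k : Int)+1) 1).foldl (fun ar i =>
      let t := (((k : Int)) - i).toNat
      ar.modify t (fun l => ((ar.getD t []).getD 0 0 - (ar.getD (t+1) []).getD 0 0) :: l)) arr
    = ((PySem.List.pyRange 0 (k : Int) 1).reverse).foldl (fun lv i =>
      lv.set i.toNat (((lv.getD i.toNat []).getD 0 0 - (lv.getD (i.toNat + 1) []).getD 0 0)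
        :: lv.getD i.toNat [])) arr := by
  rw [PySem.List.pyRange_one, PySem.List.pyRange_one]
  have h1 : ((k : Int) + 1 - 1).toNat = k := by omega
  have h2 : ((k : Int) - 0).toNat = k := by omega
  rw [h1, h2, ← List.map_reverse, rev_range, List.map_map, List.foldl_map, List.foldl_map]
  apply PySem.List.foldl_congr_mem
  intro ar j hj
  have hjk : j < k := List.mem_range.mp hj
  have ht : ((k : Int) - (1 + (j : Int))).toNat = k - 1 - j := by omega
  have ht2 : ((0 : Int) + ((k - 1 - j : Nat) : Int)).toNat = k - 1 - j := by omega
  simp only [Function.comp_apply, ht, ht2]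
  exact modify_eq_set_cons _ _ _

theorem pyRange_A_none : PySem.List.pyRange 1 (-1 + 1) 1 = [] :=
  PySem.List.pyRange_one_eq_nil (by norm_num)

theorem pyRange_B_none : PySem.List.pyRange 0 (-1) 1 = [] :=
  PySem.List.pyRange_one_eq_nil (by norm_num)

-- ===== VERDICT (by name: the statement is the Claim_ definition above) =====
theorem extendDiffListsBack_spec : Claim_equal_extendDiffListsBack := by
  intro seq _ hpre
  unfold Spec_extendDiffListsBack
  simp only [extendDiffListsBack, extendDiffListsBack_alt]
  rw [creat_eq, bBuild_eq]
  set arr := tri seq.length seq with harr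
  rw [findLen_eq arr 0]
  simp only [bFirstZero]
  cases hfi : arr.findIdx? (fun l => l.all (fun x => x == 0)) with
  | none =>
    simp only
    rw [pyRange_A_none, pyRange_B_none]
    simp only [List.foldl_nil, List.reverse_nil]
    exact modify_eq_set_cons 0 (((arr.length : Int) + -1)).toNat arr
  | some k =>
    simp only [Nat.zero_add]
    rw [if_neg (show ¬(((k : Nat) : Int) < 0) from by omega)]
    rw [modify_eq_set_cons 0 (((k : Nat) : Int)).toNat arr]
    exact loops_eq k _
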